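-- pv_equiv track=rewrite | github.com/patrickarmengol/aoc2022-exercises | day08/day08.py | scenic_matrix
-- ===== SOURCE A (Python) =====
-- def scenic_matrix(grid: list[list[int]]) -> list[list[int]]:
--     def score(row: int, col: int) -> int:
--         tree = grid[row][col]
--         a = 0
--         for t in [grid[row][x] for x in range(col+1, x_max+1)]:
--             a += 1
--             if t >= tree:
--                 break
--         b = 0
--         for t in [grid[row][x] for x in range(col-1, -1, -1)]:
--             b += 1
--             if t >= tree:
--                 break
--         c = 0
--         for t in [grid[y][col] for y in range(row+1, y_max+1)]:
--             c += 1
--             if t >= tree: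
--                 break
--         d = 0
--         for t in [grid[y][col] for y in range(row-1, -1, -1)]:
--             d += 1
--             if t >= tree:
--                 break
--         return a * b * c * d
--
--     y_max, x_max = len(grid)-1, len(grid[0])-1
--     return [[score(row, col) for col in range(1, x_max)] for row in range(1, y_max)]
-- ===== SOURCE B (Python) =====
-- def scenic_matrix(grid: list[list[int]]) -> list[list[int]]:
--     R, C = len(grid), len(grid[0])
--
--     def sweep(xs: list[int]) -> list[int]:
--         # viewing distance toward the start of xs for every position, via a monotonic stack
--         st: list[tuple[int, int]] = []  # (height, index), heights nondecreasing downward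
--         out: list[int] = []
--         for i, h in enumerate(xs):
--             while st and st[-1][0] < h:
--                 st.pop()
--             out.append(i - st[-1][1] if st else i)
--             st.append((h, i))
--         return out
--
--     lefts = [sweep(row) for row in grid]
--     rights = [sweep(row[::-1])[::-1] for row in grid]
--     cols = [list(col) for col in zip(*grid)]
--     ups = [sweep(col) for col in cols]
--     downs = [sweep(col[::-1])[::-1] for col in cols]
--     return [[lefts[r][c] * rights[r][c] * ups[c][r] * downs[c][r]
--              for c in range(1, C - 1)] for r in range(1, R - 1)]
-- ===== Notes on version B (the rewrite author's own statement) =====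
-- stated objective: faster
-- what changed: Per-cell rescans in all four directions are replaced by monotonic-stack sweeps that compute every viewing distance of a row/column in one pass (columns obtained once via zip-transpose), then interior cells just multiply four table lookups.
-- outside the precondition, e.g. on scenic_matrix([[3, 4, 0], [0, 3, 2, 4], [0, 1, 4, 1]]): A returns [[1]], B returns [[2]]
import Mathlib
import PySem

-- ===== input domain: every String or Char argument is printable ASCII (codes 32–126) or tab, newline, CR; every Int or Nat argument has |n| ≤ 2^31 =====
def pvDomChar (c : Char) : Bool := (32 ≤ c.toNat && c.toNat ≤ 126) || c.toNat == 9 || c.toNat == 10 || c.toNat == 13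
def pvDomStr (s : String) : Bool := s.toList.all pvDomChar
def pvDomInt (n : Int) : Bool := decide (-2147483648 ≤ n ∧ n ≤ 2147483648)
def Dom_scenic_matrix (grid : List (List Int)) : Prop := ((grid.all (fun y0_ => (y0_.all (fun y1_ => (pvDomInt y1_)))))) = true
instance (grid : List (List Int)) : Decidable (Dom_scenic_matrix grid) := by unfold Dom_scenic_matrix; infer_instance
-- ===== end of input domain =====

-- B replaces A's per-cell four-directional rescans by one monotonic-stack sweep per row/column
-- (columns via a zip-transpose), an asymptotically faster exact algorithm (objective: faster).


-- ===== PORT A =====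
-- grid[r][x]; every index is in range on the admitted inputs (Pre_ below), so pyGetD is exact there
def pvIdx (grid : List (List Int)) (r x : Int) : Int :=
  PySem.List.pyGetD (PySem.List.pyGetD grid r []) x 0

-- 'a = 0; for t in L: a += 1; if t >= tree: break'
def pvLoopBreak (tree : Int) : List Int → Int
  | [] => 0
  | t :: ts => if tree ≤ t then 1 else 1 + pvLoopBreak tree ts

def pvScore (grid : List (List Int)) (y_max x_max row col : Int) : Int :=
  let tree := pvIdx grid row col
  let a := pvLoopBreak tree ((PySem.List.pyRange (col + 1) (x_max + 1) 1).map (fun x => pvIdx grid row x))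
  let b := pvLoopBreak tree ((PySem.List.pyRange (col - 1) (-1) (-1)).map (fun x => pvIdx grid row x))
  let c := pvLoopBreak tree ((PySem.List.pyRange (row + 1) (y_max + 1) 1).map (fun y => pvIdx grid y col))
  let d := pvLoopBreak tree ((PySem.List.pyRange (row - 1) (-1) (-1)).map (fun y => pvIdx grid y col))
  a * b * c * d

def scenic_matrix (grid : List (List Int)) : List (List Int) :=
  let y_max : Int := (grid.length : Int) - 1
  let x_max : Int := ((PySem.List.pyGetD grid 0 []).length : Int) - 1   -- len(grid[0]); grid ≠ [] under Pre_
  (PySem.List.pyRange 1 y_max 1).map (fun row =>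
    (PySem.List.pyRange 1 x_max 1).map (fun col => pvScore grid y_max x_max row col))

-- ===== PORT B =====
-- 'while st and st[-1][0] < h: st.pop()'
def pvPop (h : Int) : List (Int × Int) → List (Int × Int)
  | [] => []
  | (hh, j) :: rest => if hh < h then pvPop h rest else (hh, j) :: rest

-- the body of sweep's for-loop: stack st of (height, index) pairs, i the current index
def pvSweepGo (st : List (Int × Int)) (i : Int) : List Int → List Int
  | [] => []
  | h :: t =>
    let s := pvPop h st
    (match s with | [] => i | (_, j) :: _ => i - j) :: pvSweepGo ((h, i) :: s) (i + 1) t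

def pvSweep (xs : List Int) : List Int := pvSweepGo [] 0 xs

-- zip(*grid): columns truncated to the shortest row (exact model of Python's zip, by index)
def pvMinLen : List (List Int) → Nat
  | [] => 0
  | r :: rs => rs.foldl (fun m q => min m q.length) r.length

def pvCols (g : List (List Int)) : List (List Int) :=
  (List.range (pvMinLen g)).map (fun c => g.map (fun r => r.getD c 0))

def scenic_matrix_alt (grid : List (List Int)) : List (List Int) :=
  let R : Int := (grid.length : Int)
  let C : Int := ((PySem.List.pyGetD grid 0 []).length : Int)
  let lefts := grid.map pvSweep
  let rights := grid.map (fun row => (pvSweep row.reverse).reverse)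
  let cols := pvCols grid
  let ups := cols.map pvSweep
  let downs := cols.map (fun col => (pvSweep col.reverse).reverse)
  (PySem.List.pyRange 1 (R - 1) 1).map (fun r =>
    (PySem.List.pyRange 1 (C - 1) 1).map (fun c =>
      PySem.List.pyGetD (PySem.List.pyGetD lefts r []) c 0 *
      PySem.List.pyGetD (PySem.List.pyGetD rights r []) c 0 *
      PySem.List.pyGetD (PySem.List.pyGetD ups c []) r 0 *
      PySem.List.pyGetD (PySem.List.pyGetD downs c []) r 0))

-- ===== PRECONDITION & SPEC =====
-- Pre_ excludes the empty grid (A raises IndexError on grid[0]) and ragged grids big enough that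
-- interior scores are actually computed (≥ 3 rows and row 0 of length ≥ 3), on which A raises for
-- rows shorter than row 0 and, where it still returns, scans an accidental row-0-width window of
-- the longer rows while B's zip-transpose truncates to the shortest row; degenerate sizes, where
-- no score is computed and the two agree even ragged, stay inside.
def Pre_scenic_matrix (grid : List (List Int)) : Prop :=
  grid ≠ [] ∧ ((∀ row ∈ grid, row.length = (grid.headD []).length)
    ∨ grid.length ≤ 2 ∨ (grid.headD []).length ≤ 2)
instance (grid : List (List Int)) : Decidable (Pre_scenic_matrix grid) := by
  unfold Pre_scenic_matrix; infer_instance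

def pvWitness_scenic_matrix : List (List Int) := [[3, 0, 3], [2, 5, 1], [6, 2, 3]]

def Spec_scenic_matrix (grid : List (List Int)) (out : List (List Int)) : Prop := out = scenic_matrix_alt grid
instance (grid : List (List Int)) (out : List (List Int)) : Decidable (Spec_scenic_matrix grid out) := by unfold Spec_scenic_matrix; infer_instance

-- ===== CLAIM (what is proved, stated in full; the proofs are below) =====
def Claim_equal_scenic_matrix : Prop := ∀ (grid : List (List Int)), Dom_scenic_matrix grid → Pre_scenic_matrix grid → Spec_scenic_matrix grid (scenic_matrix grid)

-- ===== LEMMAS AND PROOFS =====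

-- popping with a weaker bound first changes nothing
lemma pvPop_pvPop (x h : Int) (hxh : x ≤ h) (st : List (Int × Int)) :
    pvPop h (pvPop x st) = pvPop h st := by
  induction st with
  | nil => rfl
  | cons p rest ih =>
    obtain ⟨hh, j⟩ := p
    by_cases hlt : hh < x
    · simp [pvPop, hlt, lt_of_lt_of_le hlt hxh, ih]
    · simp [pvPop, hlt]

def pvDOf (st : List (Int × Int)) (i : Int) : Int :=
  match st with | [] => i | (_, j) :: _ => i - j

lemma pvDOf_succ (st : List (Int × Int)) (i : Int) : pvDOf st (i + 1) = 1 + pvDOf st i := by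
  cases st with
  | nil => simp [pvDOf]; ring
  | cons p rest => simp [pvDOf]; ring

-- the stack that sweep's loop has built after processing prefix p
def pvStack (p : List Int) : List (Int × Int) :=
  (PySem.List.enumerate p 0).foldl (fun st pr => (pr.2, pr.1) :: pvPop pr.2 st) []

lemma pvStack_append (p : List Int) (x : Int) :
    pvStack (p ++ [x]) = (x, (p.length : Int)) :: pvPop x (pvStack p) := by
  simp [pvStack, PySem.List.enumerate_append, PySem.List.enumerate_cons,
        PySem.List.enumerate_nil, List.foldl_append]

-- KEY: the popped stack yields exactly A's break-counting loop value on the reversed prefix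
lemma pvKey (p : List Int) (h : Int) :
    pvDOf (pvPop h (pvStack p)) (p.length : Int) = pvLoopBreak h p.reverse := by
  induction p using List.reverseRecOn with
  | nil => simp [pvStack, PySem.List.enumerate_nil, pvPop, pvDOf, pvLoopBreak]
  | append_singleton q x ih =>
    rw [pvStack_append]
    by_cases hxh : x < h
    · have hcast : (((q ++ [x]).length : Nat) : Int) = (q.length : Int) + 1 := by
        simp [List.length_append]
      rw [hcast]
      simp only [pvPop, if_pos hxh]
      rw [pvPop_pvPop x h (le_of_lt hxh), pvDOf_succ, ih]
      simp [pvLoopBreak, not_le.mpr hxh]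
    · have hle : h ≤ x := not_lt.mp hxh
      simp only [pvPop, if_neg hxh, pvDOf, List.reverse_append, List.reverse_singleton,
                 List.singleton_append, pvLoopBreak, if_pos hle, List.length_append,
                 List.length_cons, List.length_nil]
      push_cast
      ring

-- the specification list the sweep computes: one loop value per position
def pvDists (p : List Int) : List Int → List Int
  | [] => []
  | h :: t => pvLoopBreak h p.reverse :: pvDists (p ++ [h]) t

lemma pvSweepGo_eq (xs : List Int) : ∀ p : List Int,
    pvSweepGo (pvStack p) (p.length : Int) xs = pvDists p xs := by
  induction xs with
  | nil => intro p; rfl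
  | cons h t ih =>
    intro p
    have hhead : (match pvPop h (pvStack p) with
        | [] => (p.length : Int) | (_, j) :: _ => (p.length : Int) - j)
        = pvDOf (pvPop h (pvStack p)) (p.length : Int) := by
      cases pvPop h (pvStack p) <;> rfl
    show _ :: _ = _ :: _
    rw [hhead, pvKey]
    have htail : (h, (p.length : Int)) :: pvPop h (pvStack p) = pvStack (p ++ [h]) :=
      (pvStack_append p h).symm
    have hlen : (p.length : Int) + 1 = (((p ++ [h]).length : Nat) : Int) := by
      simp [List.length_append]
    rw [htail, hlen, ih (p ++ [h])]

lemma pvSweep_eq (xs : List Int) : pvSweep xs = pvDists [] xs := by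
  simpa [pvSweep, pvStack, PySem.List.enumerate_nil] using pvSweepGo_eq xs []

lemma pvDists_length (xs : List Int) : ∀ p, (pvDists p xs).length = xs.length := by
  induction xs with
  | nil => intro p; rfl
  | cons h t ih => intro p; simp [pvDists, ih]

lemma pvDists_getD (xs : List Int) : ∀ (p : List Int) (j : Nat), j < xs.length →
    (pvDists p xs).getD j 0 = pvLoopBreak (xs.getD j 0) ((p ++ xs.take j).reverse) := by
  induction xs with
  | nil => intro p j hj; simp at hj
  | cons h t ih =>
    intro p j hj
    cases j with
    | zero => simp [pvDists]
    | succ j =>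
      have hj' : j < t.length := by simpa using hj
      simp only [pvDists, List.getD_cons_succ, List.take_succ_cons]
      rw [ih (p ++ [h]) j hj']
      simp

lemma pvSweep_length (xs : List Int) : (pvSweep xs).length = xs.length := by
  rw [pvSweep_eq]; exact pvDists_length xs []

lemma pvSweep_getD (xs : List Int) (j : Nat) (hj : j < xs.length) :
    (pvSweep xs).getD j 0 = pvLoopBreak (xs.getD j 0) ((xs.take j).reverse) := by
  rw [pvSweep_eq, pvDists_getD xs [] j hj]; simp

-- the reversed sweep of the reversed list, looked up at j: distance toward the END of xs
lemma pvRevSweep_getD (xs : List Int) (j : Nat) (hj : j < xs.length) :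
    ((pvSweep xs.reverse).reverse).getD j 0 = pvLoopBreak (xs.getD j 0) (xs.drop (j + 1)) := by
  have hlen : (pvSweep xs.reverse).length = xs.length := by
    rw [pvSweep_length, List.length_reverse]
  have hj' : j < (pvSweep xs.reverse).reverse.length := by
    simpa [hlen] using hj
  rw [List.getD_eq_getElem _ _ hj', List.getElem_reverse]
  have hidx : (pvSweep xs.reverse).length - 1 - j = xs.length - 1 - j := by rw [hlen]
  have hjlt : xs.length - 1 - j < xs.reverse.length := by simp; omega
  rw [← List.getD_eq_getElem _ 0, hidx, pvSweep_getD xs.reverse _ (by simpa using hjlt)]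
  congr 1
  · rw [List.getD_eq_getElem _ _ hjlt, List.getElem_reverse]
    simp only [show xs.length - 1 - (xs.length - 1 - j) = j from by omega]
    rw [List.getD_eq_getElem _ _ hj]
  · rw [List.take_reverse, List.reverse_reverse]
    congr 1
    simp at hjlt
    omega

-- '[xs[k] for k in range(0, c)]' is take, for c ≤ len xs
lemma map_pyGetD_range_take (ρ : List Int) (c : Nat) (hc : c ≤ ρ.length) :
    (PySem.List.pyRange 0 (c : Int) 1).map (fun j => PySem.List.pyGetD ρ j 0) = ρ.take c := by
  apply List.ext_getElem
  · simp [PySem.List.length_pyRange_one, hc]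
  · intro k hk1 hk2
    have hkc : k < c := by
      simpa [PySem.List.length_pyRange_one] using hk1
    have hklen : k < ρ.length := lt_of_lt_of_le hkc hc
    simp [PySem.List.getElem_pyRange_one, List.getElem_take, hklen]

lemma foldl_min_const (L : Nat) (rs : List (List Int)) (h : ∀ q ∈ rs, q.length = L) :
    rs.foldl (fun m q => min m q.length) L = L := by
  induction rs with
  | nil => rfl
  | cons q qs ih =>
    simp only [List.foldl_cons, h q (by simp), min_self]
    exact ih (fun p hp => h p (by simp [hp]))

lemma pvMinLen_rect (grid : List (List Int)) (hne : grid ≠ [])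
    (hrect : ∀ row ∈ grid, row.length = (grid.headD []).length) :
    pvMinLen grid = (grid.headD []).length := by
  obtain ⟨r0, rs, rfl⟩ := List.exists_cons_of_ne_nil hne
  simp only [List.headD_cons] at hrect ⊢
  show rs.foldl (fun m q => min m q.length) r0.length = r0.length
  exact foldl_min_const r0.length rs (fun q hq => hrect q (by simp [hq]))

-- the y-th element of column c of the grid
lemma col_getD (grid : List (List Int)) (c : Nat) (y : Nat) (hy : y < grid.length) :
    (grid.map (fun r => r.getD c 0)).getD y 0 = (grid.getD y []).getD c 0 := by
  rw [List.getD_eq_getElem _ _ (by simpa using hy), List.getElem_map,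
      List.getD_eq_getElem _ _ hy]

theorem pv_rect (grid : List (List Int)) (hne : grid ≠ [])
    (hrect : ∀ row ∈ grid, row.length = (grid.headD []).length) :
    scenic_matrix grid = scenic_matrix_alt grid := by
  unfold scenic_matrix scenic_matrix_alt
  simp only []
  apply List.map_congr_left
  intro r hr
  apply List.map_congr_left
  intro c hc
  rw [PySem.List.mem_pyRange_one] at hr hc
  set Cn : Nat := (grid.headD []).length with hCn
  have hg0 : PySem.List.pyGetD grid 0 [] = grid.headD [] := by
    rw [PySem.List.pyGetD_zero]; cases grid with
    | nil => exact absurd rfl hne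
    | cons a l => rfl
  have hr1 : 1 ≤ r := hr.1
  have hr2 : r < (grid.length : Int) - 1 := hr.2
  have hc2 : c < (Cn : Int) - 1 := by
    have := hc.2; rw [hg0] at this; exact this
  have hc1 : 1 ≤ c := hc.1
  obtain ⟨r', rfl⟩ : ∃ r' : Nat, r = (r' : Int) := ⟨r.toNat, (Int.toNat_of_nonneg (by omega)).symm⟩
  obtain ⟨c', rfl⟩ : ∃ c' : Nat, c = (c' : Int) := ⟨c.toNat, (Int.toNat_of_nonneg (by omega)).symm⟩
  have hrR : r' + 1 < grid.length := by exact_mod_cast (by omega : (r' : Int) + 1 < (grid.length : Int))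
  have hcC : c' + 1 < Cn := by exact_mod_cast (by omega : (c' : Int) + 1 < (Cn : Int))
  have hrlen : ∀ y : Nat, y < grid.length → (grid.getD y []).length = Cn := by
    intro y hy
    rw [List.getD_eq_getElem _ _ hy]
    exact hrect _ (List.getElem_mem hy)
  set ρ : List Int := grid.getD r' [] with hρ
  have hρlen : ρ.length = Cn := hrlen r' (by omega)
  set κ : List Int := grid.map (fun q => q.getD c' 0) with hκ
  have hκlen : κ.length = grid.length := by rw [hκ, List.length_map]
  -- indexing collapses to getD on the row / the column
  have hrowIdx : ∀ x : Int, pvIdx grid (r' : Int) x = PySem.List.pyGetD ρ x 0 := by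
    intro x
    unfold pvIdx
    rw [PySem.List.pyGetD_natCast]
  have hcolIdx : ∀ y : Int, 0 ≤ y → y < (grid.length : Int) →
      pvIdx grid y (c' : Int) = PySem.List.pyGetD κ y 0 := by
    intro y hy hylt
    obtain ⟨y', rfl⟩ : ∃ y' : Nat, y = (y' : Int) := ⟨y.toNat, (Int.toNat_of_nonneg hy).symm⟩
    have hy'lt : y' < grid.length := by exact_mod_cast hylt
    unfold pvIdx
    simp only [PySem.List.pyGetD_natCast]
    exact (col_getD grid c' y' hy'lt).symm
  have htree : pvIdx grid (r' : Int) (c' : Int) = ρ.getD c' 0 := by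
    rw [hrowIdx, PySem.List.pyGetD_natCast]
  -- A's four comprehension lists
  have hA_a : (PySem.List.pyRange ((c' : Int) + 1) (((PySem.List.pyGetD grid 0 []).length : Int) - 1 + 1) 1).map
      (fun x => pvIdx grid (r' : Int) x) = ρ.drop (c' + 1) := by
    rw [hg0, ← hCn]
    have h1 : (Cn : Int) - 1 + 1 = ((ρ.length : Nat) : Int) := by rw [hρlen]; ring
    rw [h1, List.map_congr_left (fun x _ => hrowIdx x)]
    have := PySem.List.map_pyGetD_pyRange' (xs := ρ) (a := (c' : Int) + 1) (d := 0) (by positivity)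
    simpa using this
  have hA_b : (PySem.List.pyRange ((c' : Int) - 1) (-1) (-1)).map
      (fun x => pvIdx grid (r' : Int) x) = (ρ.take c').reverse := by
    rw [PySem.List.pyRange_neg_one_eq_reverse]
    have h1 : (c' : Int) - 1 + 1 = (c' : Int) := by ring
    rw [h1, show (-1 : Int) + 1 = 0 from by ring, List.map_reverse,
        List.map_congr_left (fun x _ => hrowIdx x), map_pyGetD_range_take ρ c' (by omega)]
  have hA_c : (PySem.List.pyRange ((r' : Int) + 1) ((grid.length : Int) - 1 + 1) 1).map
      (fun y => pvIdx grid y (c' : Int)) = κ.drop (r' + 1) := by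
    have h1 : (grid.length : Int) - 1 + 1 = ((κ.length : Nat) : Int) := by rw [hκlen]; ring
    rw [h1, List.map_congr_left (g := fun y => PySem.List.pyGetD κ y 0) (fun y hy => by
      rw [PySem.List.mem_pyRange_one] at hy
      exact hcolIdx y (by omega) (by rw [hκlen] at hy; omega))]
    have := PySem.List.map_pyGetD_pyRange' (xs := κ) (a := (r' : Int) + 1) (d := 0) (by positivity)
    simpa using this
  have hA_d : (PySem.List.pyRange ((r' : Int) - 1) (-1) (-1)).map
      (fun y => pvIdx grid y (c' : Int)) = (κ.take r').reverse := by
    rw [PySem.List.pyRange_neg_one_eq_reverse]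
    have h1 : (r' : Int) - 1 + 1 = (r' : Int) := by ring
    rw [h1, show (-1 : Int) + 1 = 0 from by ring, List.map_reverse,
        List.map_congr_left (g := fun y => PySem.List.pyGetD κ y 0) (fun y hy => by
          rw [PySem.List.mem_pyRange_one] at hy
          exact hcolIdx y (by omega) (by rw [hκlen] at *; omega)),
        map_pyGetD_range_take κ r' (by omega)]
  -- B's four lookups
  have hBleft : PySem.List.pyGetD (PySem.List.pyGetD (grid.map pvSweep) (r' : Int) []) (c' : Int) 0
      = pvLoopBreak (ρ.getD c' 0) ((ρ.take c').reverse) := by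
    simp only [PySem.List.pyGetD_natCast]
    have h1 : (grid.map pvSweep).getD r' [] = pvSweep ρ := by
      rw [List.getD_eq_getElem _ _ (by simpa using (by omega : r' < grid.length)),
          List.getElem_map, hρ, List.getD_eq_getElem _ _ (by omega)]
    rw [h1, pvSweep_getD ρ c' (by omega)]
  have hBright : PySem.List.pyGetD (PySem.List.pyGetD
        (grid.map (fun row => (pvSweep row.reverse).reverse)) (r' : Int) []) (c' : Int) 0
      = pvLoopBreak (ρ.getD c' 0) (ρ.drop (c' + 1)) := by
    simp only [PySem.List.pyGetD_natCast]
    have h1 : (grid.map (fun row => (pvSweep row.reverse).reverse)).getD r' []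
        = (pvSweep ρ.reverse).reverse := by
      rw [List.getD_eq_getElem _ _ (by simpa using (by omega : r' < grid.length)),
          List.getElem_map, hρ, List.getD_eq_getElem _ _ (by omega)]
    rw [h1, pvRevSweep_getD ρ c' (by omega)]
  have hcols : ∀ c'' : Nat, c'' < Cn → (pvCols grid).getD c'' [] = grid.map (fun q => q.getD c'' 0) := by
    intro c'' hc''
    unfold pvCols
    rw [pvMinLen_rect grid hne hrect, ← hCn]
    rw [List.getD_eq_getElem _ _ (by simpa using hc''), List.getElem_map, List.getElem_range]
  have hBup : PySem.List.pyGetD (PySem.List.pyGetD ((pvCols grid).map pvSweep) (c' : Int) []) (r' : Int) 0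
      = pvLoopBreak (ρ.getD c' 0) ((κ.take r').reverse) := by
    simp only [PySem.List.pyGetD_natCast]
    have hclen : c' < (pvCols grid).length := by
      unfold pvCols
      rw [List.length_map, List.length_range, pvMinLen_rect grid hne hrect, ← hCn]
      omega
    have h1 : ((pvCols grid).map pvSweep).getD c' [] = pvSweep κ := by
      rw [List.getD_eq_getElem _ _ (by simpa using hclen), List.getElem_map,
          ← List.getD_eq_getElem _ [] hclen, hcols c' (by omega), hκ]
    rw [h1, pvSweep_getD κ r' (by rw [hκlen]; omega)]
    congr 1
    rw [hκ, col_getD grid c' r' (by omega), hρ]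
  have hBdown : PySem.List.pyGetD (PySem.List.pyGetD
        ((pvCols grid).map (fun col => (pvSweep col.reverse).reverse)) (c' : Int) []) (r' : Int) 0
      = pvLoopBreak (ρ.getD c' 0) (κ.drop (r' + 1)) := by
    simp only [PySem.List.pyGetD_natCast]
    have hclen : c' < (pvCols grid).length := by
      unfold pvCols
      rw [List.length_map, List.length_range, pvMinLen_rect grid hne hrect, ← hCn]
      omega
    have h1 : ((pvCols grid).map (fun col => (pvSweep col.reverse).reverse)).getD c' []
        = (pvSweep κ.reverse).reverse := by
      rw [List.getD_eq_getElem _ _ (by simpa using hclen), List.getElem_map,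
          ← List.getD_eq_getElem _ [] hclen, hcols c' (by omega), hκ]
    rw [h1, pvRevSweep_getD κ r' (by rw [hκlen]; omega)]
    congr 1
    rw [hκ, col_getD grid c' r' (by omega), hρ]
  -- assemble
  simp only [pvScore]
  rw [htree, hA_a, hA_b, hA_c, hA_d, hBleft, hBright, hBup, hBdown]
  ring

theorem pv_main (grid : List (List Int)) (hpre : Pre_scenic_matrix grid) :
    scenic_matrix grid = scenic_matrix_alt grid := by
  obtain ⟨hne, hcase⟩ := hpre
  rcases hcase with hrect | hdeg
  · exact pv_rect grid hne hrect
  · -- degenerate sizes: no interior cell, both sides map to empty rows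
    unfold scenic_matrix scenic_matrix_alt
    simp only []
    rcases hdeg with hR | hC
    · rw [show PySem.List.pyRange 1 ((grid.length : Int) - 1) 1 = []
          from PySem.List.pyRange_one_eq_nil (by
            have : (grid.length : Int) ≤ 2 := by exact_mod_cast hR
            omega)]
      rfl
    · apply List.map_congr_left
      intro r _
      rw [PySem.List.pyRange_one_eq_nil (by
        have h2 : ((PySem.List.pyGetD grid 0 []).length : Int) ≤ 2 := by
          have : PySem.List.pyGetD grid 0 [] = grid.headD [] := by
            rw [PySem.List.pyGetD_zero]; cases grid with
            | nil => exact absurd rfl hne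
            | cons a l => rfl
          rw [this]; exact_mod_cast hC
        omega)]
      simp

-- ===== VERDICT (by name: the statement is the Claim_ definition above) =====
theorem scenic_matrix_spec : Claim_equal_scenic_matrix := by
  intro grid _ hpre
  unfold Spec_scenic_matrix
  exact pv_main grid hpre
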